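-- pv_equiv track=rewrite | github.com/BPMSoftwareSolutions/agentic-resume-tailor | scripts/generate_sequence_report.py | format_acceptance_criteria
-- ===== SOURCE A (Python) =====
-- from typing import Any, Dict, List, Optional
--
-- def format_acceptance_criteria(criteria: List[Dict[str, Any]], indent: int = 0) -> List[str]:
--     """
--     Format acceptance criteria in Given/When/Then format.
--
--     Args:
--         criteria: List of acceptance criteria dictionaries
--         indent: Number of spaces to indent
--
--     Returns:
--         List of formatted lines
--     """
--     if not criteria:
--         return ["_No acceptance criteria defined_"]
--
--     lines = []
--     indent_str = " " * indent
--
--     for idx, scenario in enumerate(criteria, 1):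
--         if len(criteria) > 1:
--             lines.append(f"{indent_str}**Scenario {idx}:**")
--             lines.append("")
--
--         # Given
--         given = scenario.get('given', [])
--         if given:
--             lines.append(f"{indent_str}**Given:**")
--             for item in given:
--                 lines.append(f"{indent_str}- {item}")
--             lines.append("")
--
--         # When
--         when = scenario.get('when', [])
--         if when:
--             lines.append(f"{indent_str}**When:**")
--             for item in when:
--                 lines.append(f"{indent_str}- {item}")
--             lines.append("")
--
--         # Then
--         then = scenario.get('then', [])
--         if then:
--             lines.append(f"{indent_str}**Then:**")
--             for item in then:
--                 lines.append(f"{indent_str}- {item}")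
--             lines.append("")
--
--         # And (optional)
--         and_clause = scenario.get('and', [])
--         if and_clause:
--             lines.append(f"{indent_str}**And:**")
--             for item in and_clause:
--                 lines.append(f"{indent_str}- {item}")
--             lines.append("")
--
--     return lines
-- ===== SOURCE B (Python) =====
-- def format_acceptance_criteria(criteria, indent=0):
--     """Recursive back-to-front construction: each scenario block is built as a pure
--     value by a flat comprehension over labels (keys derived by lowercasing) and the
--     blocks are concatenated by structural recursion instead of an accumulator loop."""
--     if not criteria:
--         return ["_No acceptance criteria defined_"]
--     pad = " " * indent
--     multi = len(criteria) > 1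
--
--     def section(label, items):
--         if not items:
--             return []
--         return [f"{pad}**{label}:**"] + [f"{pad}- {it}" for it in items] + [""]
--
--     def build(rest, idx):
--         if not rest:
--             return []
--         scenario = rest[0]
--         head = [f"{pad}**Scenario {idx}:**", ""] if multi else []
--         body = [line for label in ("Given", "When", "Then", "And")
--                 for line in section(label, scenario.get(label.lower(), []))]
--         return head + body + build(rest[1:], idx + 1)
--
--     return build(criteria, 1)
-- ===== Notes on version B (the rewrite author's own statement) =====
-- stated objective: simpler
-- what changed: Replaces A's imperative append-accumulator loop with four copy-pasted section blocks by a structural recursion over the scenario list that concatenates pure per-scenario blocks, each produced by a flat comprehension over section labels whose dict keys are derived by lowercasing the label.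
import Mathlib
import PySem

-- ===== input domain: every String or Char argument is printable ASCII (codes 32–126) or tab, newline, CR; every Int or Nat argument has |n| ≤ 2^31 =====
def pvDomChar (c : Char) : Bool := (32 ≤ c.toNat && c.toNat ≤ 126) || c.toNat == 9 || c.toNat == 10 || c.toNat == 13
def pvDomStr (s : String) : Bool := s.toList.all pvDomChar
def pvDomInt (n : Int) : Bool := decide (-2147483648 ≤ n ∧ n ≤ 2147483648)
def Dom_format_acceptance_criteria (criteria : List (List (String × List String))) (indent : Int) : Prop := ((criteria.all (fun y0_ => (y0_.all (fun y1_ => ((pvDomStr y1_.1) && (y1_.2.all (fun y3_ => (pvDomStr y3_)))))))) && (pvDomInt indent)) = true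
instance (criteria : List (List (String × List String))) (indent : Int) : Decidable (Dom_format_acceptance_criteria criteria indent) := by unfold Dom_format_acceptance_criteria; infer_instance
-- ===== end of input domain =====

-- B rebuilds the output by structural recursion over the scenario list, concatenating
-- pure per-scenario blocks built by a flatMap over section labels (keys = lowercased
-- labels), instead of A's append-accumulator loop with four copy-pasted blocks (objective: simpler).


-- ===== PORT A =====
-- scenario.get(key, []) : first-match association-list lookup (Python dict semantics)
def facGet (scenario : List (String × List String)) (key : String) : List String :=
  (PySem.Dict.mk scenario).getD key []

def format_acceptance_criteria (criteria : List (List (String × List String))) (indent : Int) : List String :=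
  if criteria = [] then ["_No acceptance criteria defined_"]
  else
    let indentStr := String.ofList (List.replicate indent.toNat ' ')   -- " " * indent ("" for indent ≤ 0, as in Python)
    (PySem.List.enumerate criteria 1).foldl (fun lines p =>
      let idx := p.1
      let scenario := p.2
      let lines := if criteria.length > 1 then
          (lines ++ [indentStr ++ "**Scenario " ++ PySem.Int.toStr idx ++ ":**"]) ++ [""]
        else lines
      -- Given
      let given := facGet scenario "given"
      let lines := if given ≠ [] then
          (given.foldl (fun ls item => ls ++ [indentStr ++ "- " ++ item])
            (lines ++ [indentStr ++ "**Given:**"])) ++ [""]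
        else lines
      -- When
      let whenL := facGet scenario "when"
      let lines := if whenL ≠ [] then
          (whenL.foldl (fun ls item => ls ++ [indentStr ++ "- " ++ item])
            (lines ++ [indentStr ++ "**When:**"])) ++ [""]
        else lines
      -- Then
      let thenL := facGet scenario "then"
      let lines := if thenL ≠ [] then
          (thenL.foldl (fun ls item => ls ++ [indentStr ++ "- " ++ item])
            (lines ++ [indentStr ++ "**Then:**"])) ++ [""]
        else lines
      -- And
      let andL := facGet scenario "and"
      let lines := if andL ≠ [] then
          (andL.foldl (fun ls item => ls ++ [indentStr ++ "- " ++ item])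
            (lines ++ [indentStr ++ "**And:**"])) ++ [""]
        else lines
      lines) []

-- ===== PORT B =====
-- section(label, items): a pure per-section block, [] when the list is empty
def facSection (pad label : String) (items : List String) : List String :=
  if items = [] then []
  else [pad ++ "**" ++ label ++ ":**"] ++ items.map (fun it => pad ++ "- " ++ it) ++ [""]

-- build(rest, idx): structural recursion concatenating per-scenario blocks
def facBuild (pad : String) (multi : Bool) : List (List (String × List String)) → Int → List String
  | [], _ => []
  | scenario :: rest, idx =>
      (if multi then [pad ++ "**Scenario " ++ PySem.Int.toStr idx ++ ":**", ""] else [])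
      ++ (["Given", "When", "Then", "And"].flatMap
            (fun label => facSection pad label (facGet scenario (PySem.Str.lower label))))
      ++ facBuild pad multi rest (idx + 1)

def format_acceptance_criteria_alt (criteria : List (List (String × List String))) (indent : Int) : List String :=
  if criteria = [] then ["_No acceptance criteria defined_"]
  else
    let pad := String.ofList (List.replicate indent.toNat ' ')
    facBuild pad (criteria.length > 1) criteria 1

-- ===== PRECONDITION & SPEC =====
def Spec_format_acceptance_criteria (criteria : List (List (String × List String))) (indent : Int) (out : List String) : Prop := out = format_acceptance_criteria_alt criteria indent
instance (criteria : List (List (String × List String))) (indent : Int) (out : List String) : Decidable (Spec_format_acceptance_criteria criteria indent out) := by unfold Spec_format_acceptance_criteria; infer_instance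

-- ===== CLAIM =====
def Claim_equal_format_acceptance_criteria : Prop := ∀ (criteria : List (List (String × List String))) (indent : Int), Dom_format_acceptance_criteria criteria indent → Spec_format_acceptance_criteria criteria indent (format_acceptance_criteria criteria indent)

-- ===== LEMMAS AND PROOFS =====

-- one section of A's loop body equals appending B's pure section block
theorem fac_sec_eq (pad label : String) (items lines : List String) :
    (if items ≠ [] then
        (items.foldl (fun ls item => ls ++ [pad ++ "- " ++ item])
          (lines ++ [pad ++ "**" ++ label ++ ":**"])) ++ [""]
      else lines)
    = lines ++ facSection pad label items := by
  unfold facSection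
  by_cases h : items = []
  · simp [h]
  · rw [PySem.List.foldl_append_singleton_eq_map]
    simp [h, List.append_assoc]

-- A's foldl starting from any accumulator equals that accumulator followed by B's build
theorem fac_fold_eq (pad : String) (multi : Bool) (rest : List (List (String × List String)))
    (idx : Int) (lines : List String) :
    (PySem.List.enumerate rest idx).foldl (fun lines p =>
      let lines := if multi then
          (lines ++ [pad ++ "**Scenario " ++ PySem.Int.toStr p.1 ++ ":**"]) ++ [""]
        else lines
      let given := facGet p.2 "given"
      let lines := if given ≠ [] then
          (given.foldl (fun ls item => ls ++ [pad ++ "- " ++ item]) (lines ++ [pad ++ "**Given:**"])) ++ [""]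
        else lines
      let whenL := facGet p.2 "when"
      let lines := if whenL ≠ [] then
          (whenL.foldl (fun ls item => ls ++ [pad ++ "- " ++ item]) (lines ++ [pad ++ "**When:**"])) ++ [""]
        else lines
      let thenL := facGet p.2 "then"
      let lines := if thenL ≠ [] then
          (thenL.foldl (fun ls item => ls ++ [pad ++ "- " ++ item]) (lines ++ [pad ++ "**Then:**"])) ++ [""]
        else lines
      let andL := facGet p.2 "and"
      let lines := if andL ≠ [] then
          (andL.foldl (fun ls item => ls ++ [pad ++ "- " ++ item]) (lines ++ [pad ++ "**And:**"])) ++ [""]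
        else lines
      lines) lines
    = lines ++ facBuild pad multi rest idx := by
  induction rest generalizing idx lines with
  | nil => simp [facBuild, PySem.List.enumerate]
  | cons s rest ih =>
    rw [PySem.List.enumerate_cons, List.foldl_cons, ih]
    show _ ++ facBuild pad multi rest (idx + 1) = _
    rw [facBuild]
    have hg : facGet s (PySem.Str.lower "Given") = facGet s "given" := by
      rw [show PySem.Str.lower "Given" = "given" from by decide]
    have hw : facGet s (PySem.Str.lower "When") = facGet s "when" := by
      rw [show PySem.Str.lower "When" = "when" from by decide]
    have ht : facGet s (PySem.Str.lower "Then") = facGet s "then" := by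
      rw [show PySem.Str.lower "Then" = "then" from by decide]
    have ha : facGet s (PySem.Str.lower "And") = facGet s "and" := by
      rw [show PySem.Str.lower "And" = "and" from by decide]
    simp only [List.flatMap_cons, List.flatMap_nil, List.append_nil, hg, hw, ht, ha]
    have hG := fac_sec_eq pad "Given"
    have hW := fac_sec_eq pad "When"
    have hT := fac_sec_eq pad "Then"
    have hA := fac_sec_eq pad "And"
    have e1 : (pad ++ "**" ++ "Given" ++ ":**") = pad ++ "**Given:**" := by
      simp [String.append_assoc]
    have e2 : (pad ++ "**" ++ "When" ++ ":**") = pad ++ "**When:**" := by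
      simp [String.append_assoc]
    have e3 : (pad ++ "**" ++ "Then" ++ ":**") = pad ++ "**Then:**" := by
      simp [String.append_assoc]
    have e4 : (pad ++ "**" ++ "And" ++ ":**") = pad ++ "**And:**" := by
      simp [String.append_assoc]
    rw [e1] at hG; rw [e2] at hW; rw [e3] at hT; rw [e4] at hA
    simp only [hG, hW, hT, hA]
    by_cases hm : multi <;> simp [hm, List.append_assoc]

-- ===== VERDICT =====
theorem format_acceptance_criteria_spec : Claim_equal_format_acceptance_criteria := by
  intro criteria indent _
  unfold Spec_format_acceptance_criteria format_acceptance_criteria format_acceptance_criteria_alt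
  by_cases h : criteria = []
  · simp [h]
  · simp only [h, if_false]
    have hb : ∀ (a b : List String), (if criteria.length > 1 then a else b)
        = (if (decide (criteria.length > 1) : Bool) = true then a else b) := by
      intro a b; split <;> simp_all
    simp only [hb]
    rw [fac_fold_eq]
    simp
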